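-- pv_equiv track=rewrite | github.com/axpokl/LightOut | ManimGL2/lights_out_gl2 - 副本 (48).py | make_mat_k
-- ===== SOURCE A (Python) =====
-- def make_mat_k(n):
--     I = [[1 if i == j else 0 for i in range(n)] for j in range(n)]
--     Z = [[0]*n for _ in range(n)]
--     M = [[[0]*n for _ in range(n)] for _ in range(n+1)]
--     def v(A, y, x):
--         return A[y][x] if 0 <= x < n else 0
--     for y in range(n):
--         for x in range(n):
--             M[0][y][x] = I[y][x]
--     for k in range(1, n+1):
--         A = M[k-1]
--         B = M[k-2] if k-2 >= 0 else Z
--         for y in range(n):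
--             for x in range(n):
--                 M[k][y][x] = v(A, y, x-1) ^ v(A, y, x) ^ v(A, y, x+1) ^ B[y][x]
--     return M
-- ===== SOURCE B (Python) =====
-- def make_mat_k(n):
--     # Rows are n-bit integers: bit x of rows[k][y] is the (y, x) entry of M[k].
--     if n < 0:
--         return []
--     mask = (1 << n) - 1
--     mats = [[1 << y for y in range(n)]]
--     prev2 = [0] * n
--     for _ in range(n):
--         prev = mats[-1]
--         cur = [(((r << 1) & mask) ^ r ^ (r >> 1) ^ p) for r, p in zip(prev, prev2)]
--         prev2 = prev
--         mats.append(cur)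
--     return [[[(row >> x) & 1 for x in range(n)] for row in mat] for mat in mats]
-- ===== Notes on version B (the rewrite author's own statement) =====
-- stated objective: faster
-- what changed: Each matrix row is kept as one n-bit integer; the three-neighbour xor recurrence becomes masked shift/xor word operations per row instead of a per-entry inner loop with bounds-checked lookups, and the bits are expanded to lists only once at the end.
import Mathlib
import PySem

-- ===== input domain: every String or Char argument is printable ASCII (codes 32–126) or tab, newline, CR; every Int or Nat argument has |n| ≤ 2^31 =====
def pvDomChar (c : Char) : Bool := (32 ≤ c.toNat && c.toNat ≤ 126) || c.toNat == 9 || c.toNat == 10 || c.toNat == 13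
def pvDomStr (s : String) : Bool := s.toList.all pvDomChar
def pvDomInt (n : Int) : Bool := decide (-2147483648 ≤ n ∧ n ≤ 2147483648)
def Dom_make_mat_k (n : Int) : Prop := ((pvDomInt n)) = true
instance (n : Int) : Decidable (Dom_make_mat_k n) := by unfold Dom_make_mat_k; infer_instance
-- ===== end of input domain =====

-- B keeps each matrix row as one n-bit integer and replaces the per-entry inner
-- loops by one masked shift/xor word operation per row, expanding bits to 0/1
-- lists once at the end.

-- ===== PORT A =====
-- Python helper v(A, y, x); y is always in range at every call site, so the
-- defaulted lookups are exact.
def pvV (n : Int) (A : List (List Int)) (y x : Int) : Int :=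
  if 0 ≤ x ∧ x < n then PySem.List.pyGetD (PySem.List.pyGetD A y []) x 0 else 0

-- body of A's `for k in range(1, n+1)` loop: the double loop overwrites every
-- entry of M[k], i.e. M[k] := the freshly computed matrix (k is in range, so
-- pySetD / the defaulted pyGetD are exact)
def pvAStep (n : Int) (Z : List (List Int)) (M : List (List (List Int))) (k : Int) :
    List (List (List Int)) :=
  let A := PySem.List.pyGetD M (k - 1) []
  let B := if k - 2 ≥ 0 then PySem.List.pyGetD M (k - 2) [] else Z
  PySem.List.pySetD M k
    ((PySem.List.pyRange 0 n 1).map (fun y =>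
      (PySem.List.pyRange 0 n 1).map (fun x =>
        PySem.Int.bxor (PySem.Int.bxor (PySem.Int.bxor
          (pvV n A y (x - 1)) (pvV n A y x)) (pvV n A y (x + 1)))
          (PySem.List.pyGetD (PySem.List.pyGetD B y []) x 0))))

-- Literal port of A: preallocate M as n+1 zero matrices; the first double loop
-- writes every entry of M[0], i.e. M[0] := I; then the k-loop.
def make_mat_k (n : Int) : List (List (List Int)) :=
  let I : List (List Int) :=
    (PySem.List.pyRange 0 n 1).map (fun j =>
      (PySem.List.pyRange 0 n 1).map (fun i => if i = j then (1 : Int) else 0))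
  let Z : List (List Int) :=
    (PySem.List.pyRange 0 n 1).map (fun _ => List.replicate n.toNat (0 : Int))
  let M0 : List (List (List Int)) :=
    (PySem.List.pyRange 0 (n + 1) 1).map (fun _ => Z)
  let M1 := PySem.List.pySetD M0 0 I
  (PySem.List.pyRange 1 (n + 1) 1).foldl (pvAStep n Z) M1

-- ===== PORT B =====
-- one row update: ((r << 1) & mask) ^ r ^ (r >> 1) ^ p
def pvStep (mask r p : Nat) : Nat := (((r <<< 1) &&& mask) ^^^ r ^^^ (r >>> 1)) ^^^ p

-- body of B's k-loop: state is (mats, prev2); mats[-1] is pyGetD at -1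
def pvBStep (mask : Nat) (st : List (List Nat) × List Nat) : List (List Nat) × List Nat :=
  let prev := PySem.List.pyGetD st.1 (-1) []
  let cur := List.zipWith (fun r p => pvStep mask r p) prev st.2
  (st.1 ++ [cur], prev)

-- Port of B (Source B): every row is one n-bit natural number (all row values in
-- Source B are nonnegative integers); bits are expanded to 0/1 lists at the end.
def make_mat_k_alt (n : Int) : List (List (List Int)) :=
  if n < 0 then [] else
  let nn := n.toNat
  let mask := (1 <<< nn) - 1
  let res := (List.range nn).foldl (fun st _ => pvBStep mask st)
    ([(List.range nn).map (fun y => 1 <<< y)], List.replicate nn 0)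
  res.1.map (fun mat => mat.map (fun row =>
    (List.range nn).map (fun x => (((row >>> x) &&& 1 : Nat) : Int))))

-- ===== PRECONDITION & SPEC =====
def Spec_make_mat_k (n : Int) (out : List (List (List Int))) : Prop := out = make_mat_k_alt n
instance (n : Int) (out : List (List (List Int))) : Decidable (Spec_make_mat_k n out) := by unfold Spec_make_mat_k; infer_instance

-- ===== CLAIM (what is proved, stated in full; the proofs are below) =====
def Claim_equal_make_mat_k : Prop := ∀ (n : Int), Dom_make_mat_k n → Spec_make_mat_k n (make_mat_k n)

-- ===== LEMMAS AND PROOFS =====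

-- the row sequence both programs compute: (rows of M[k], rows of M[k-1] / zeros)
def pvRows (nn : Nat) : Nat → List Nat × List Nat
  | 0 => ((List.range nn).map (fun y => 1 <<< y), List.replicate nn 0)
  | k + 1 =>
      (List.zipWith (fun r p => pvStep (1 <<< nn - 1) r p)
        (pvRows nn k).1 (pvRows nn k).2, (pvRows nn k).1)

-- bit expansion of a row-integer matrix
def pvExpand (nn : Nat) (mat : List Nat) : List (List Int) :=
  mat.map (fun row => (List.range nn).map (fun x => (((row >>> x) &&& 1 : Nat) : Int)))

def pvG (nn k : Nat) : List (List Int) := pvExpand nn (pvRows nn k).1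

def pvZl (nn : Nat) : List (List Int) := List.replicate nn (List.replicate nn (0 : Int))

lemma bit_eq (m x : Nat) : ((m >>> x) &&& 1) = (m.testBit x).toNat := by
  simp [Nat.testBit, Nat.and_one_is_mod]
  rcases Nat.mod_two_eq_zero_or_one (m >>> x) with h | h <;> simp [h]

lemma pvRows_len (nn k : Nat) :
    ((pvRows nn k).1.length = nn) ∧ ((pvRows nn k).2.length = nn) := by
  induction k with
  | zero => simp [pvRows]
  | succ k ih => simp [pvRows, List.length_zipWith, ih.1, ih.2]

lemma pvStep_lt (nn r p : Nat) (hr : r < 2 ^ nn) (hp : p < 2 ^ nn) :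
    pvStep (1 <<< nn - 1) r p < 2 ^ nn := by
  have h1 : (r <<< 1) &&& (1 <<< nn - 1) < 2 ^ nn := by
    rw [Nat.one_shiftLeft, Nat.and_two_pow_sub_one_eq_mod]
    exact Nat.mod_lt _ (Nat.two_pow_pos _)
  have h2 : r >>> 1 < 2 ^ nn := lt_of_le_of_lt (by simp [Nat.shiftRight_succ, Nat.div_le_self]) hr
  exact Nat.xor_lt_two_pow (Nat.xor_lt_two_pow (Nat.xor_lt_two_pow h1 hr) h2) hp

lemma pvRows_bound (nn k : Nat) :
    (∀ r ∈ (pvRows nn k).1, r < 2 ^ nn) ∧ (∀ r ∈ (pvRows nn k).2, r < 2 ^ nn) := by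
  induction k with
  | zero =>
    constructor
    · intro r hr
      simp [pvRows] at hr
      obtain ⟨y, hy, rfl⟩ := hr
      simpa [Nat.one_shiftLeft] using Nat.pow_lt_pow_right (by norm_num) hy
    · intro r hr
      simp [pvRows] at hr
      simp [hr]
  | succ k ih =>
    refine ⟨?_, ih.1⟩
    intro r hr
    rw [List.mem_iff_getElem] at hr
    obtain ⟨i, hi, he⟩ := hr
    simp only [pvRows, List.getElem_zipWith, List.length_zipWith] at he hi
    exact he ▸ pvStep_lt nn _ _ (ih.1 _ (List.getElem_mem _)) (ih.2 _ (List.getElem_mem _))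

lemma pvStep_testBit (nn r p x : Nat) (hx : x < nn) :
    (pvStep (1 <<< nn - 1) r p).testBit x =
      ((((if x = 0 then false else r.testBit (x - 1)).xor (r.testBit x)).xor
        (r.testBit (x + 1))).xor (p.testBit x)) := by
  simp only [pvStep, Nat.testBit_xor, Nat.testBit_and, Nat.testBit_shiftLeft,
    Nat.testBit_shiftRight, Nat.one_shiftLeft, Nat.testBit_two_pow_sub_one, Nat.add_comm 1 x]
  by_cases h0 : x = 0 <;> simp [h0, hx]
  · omega

lemma toNat_xor (b c : Bool) : b.toNat ^^^ c.toNat = (b.xor c).toNat := by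
  cases b <;> cases c <;> rfl

lemma bxor_zero_left (a : Int) : PySem.Int.bxor 0 a = a := by
  rw [PySem.Int.bxor_comm, PySem.Int.bxor_zero]

lemma pvExpand_getD (nn : Nat) (m : List Nat) (hm : m.length = nn) (y x : Nat)
    (hy : y < nn) (hx : x < nn) :
    PySem.List.pyGetD (PySem.List.pyGetD (pvExpand nn m) (y : Int) []) (x : Int) 0
      = (((m[y]'(by omega) >>> x) &&& 1 : Nat) : Int) := by
  simp [pvExpand, PySem.List.pyGetD_natCast, List.getD_eq_getElem?_getD, hm, hy, hx]

lemma pvV_cast (nn : Nat) (m : List Nat) (hm : m.length = nn) (hb : ∀ r ∈ m, r < 2 ^ nn)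
    (y : Nat) (hy : y < nn) (i : Int) :
    pvV (nn : Int) (pvExpand nn m) (y : Int) i
      = if 0 ≤ i then (((m[y]'(by omega)).testBit i.toNat).toNat : Int) else 0 := by
  have hyy : y < m.length := by omega
  by_cases h0 : 0 ≤ i
  · by_cases h1 : i < (nn : Int)
    · have : i = ((i.toNat : Nat) : Int) := by omega
      rw [pvV, if_pos ⟨h0, h1⟩, this, pvExpand_getD nn m hm y i.toNat hy (by omega)]
      rw [bit_eq]; simp; congr 2; omega
    · rw [pvV, if_neg (by omega), if_pos h0]
      have : (m[y]'hyy).testBit i.toNat = false :=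
        Nat.testBit_lt_two_pow (lt_of_lt_of_le (hb _ (List.getElem_mem _))
          (Nat.pow_le_pow_right (by norm_num) (by omega)))
      simp [this]
  · rw [pvV, if_neg (by omega), if_neg h0]

-- one k-step of A, on expanded matrices, equals the next expanded word step
lemma pvCore (nn k : Nat) :
    ((PySem.List.pyRange 0 (nn : Int) 1).map (fun y =>
      (PySem.List.pyRange 0 (nn : Int) 1).map (fun x =>
        PySem.Int.bxor (PySem.Int.bxor (PySem.Int.bxor
          (pvV (nn : Int) (pvExpand nn (pvRows nn k).1) y (x - 1))
          (pvV (nn : Int) (pvExpand nn (pvRows nn k).1) y x))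
          (pvV (nn : Int) (pvExpand nn (pvRows nn k).1) y (x + 1)))
          (PySem.List.pyGetD (PySem.List.pyGetD (pvExpand nn (pvRows nn k).2) y []) x 0))))
    = pvG nn (k + 1) := by
  have hl1 := (pvRows_len nn k).1
  have hl2 := (pvRows_len nn k).2
  have hl1' := (pvRows_len nn (k+1)).1
  have hb1 := (pvRows_bound nn k).1
  rw [PySem.List.pyRange_zero_natCast]
  apply List.ext_getElem
  · simp [pvG, pvExpand, hl1']
  intro y hy hy'
  simp only [List.length_map, List.length_range] at hy
  apply List.ext_getElem
  · simp [pvG, pvExpand]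
  intro x hx hx'
  simp only [List.getElem_map, List.getElem_range]
  have hx : x < nn := by simpa [List.length_range] using hx
  have hyr : y < (pvRows nn (k+1)).1.length := by omega
  have hrow : (pvRows nn (k+1)).1[y]'hyr
      = pvStep (1 <<< nn - 1) ((pvRows nn k).1[y]'(by omega)) ((pvRows nn k).2[y]'(by omega)) := by
    simp [pvRows, List.getElem_zipWith]
  have hrhs : ((pvG nn (k + 1))[y]'hy')[x]'(by simpa [List.length_range] using hx') =
      (((pvStep (1 <<< nn - 1) ((pvRows nn k).1[y]'(by omega))
        ((pvRows nn k).2[y]'(by omega))).testBit x).toNat : Int) := by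
    simp only [pvG, pvExpand, List.getElem_map, List.getElem_range]
    rw [bit_eq, hrow]
  rw [hrhs, pvStep_testBit nn _ _ x hx]
  rw [pvV_cast nn _ hl1 hb1 y hy, pvV_cast nn _ hl1 hb1 y hy, pvV_cast nn _ hl1 hb1 y hy]
  have hB : PySem.List.pyGetD (PySem.List.pyGetD (pvExpand nn (pvRows nn k).2) (y : Int) []) (x : Int) 0
      = ((((pvRows nn k).2[y]'(by omega)).testBit x).toNat : Int) := by
    rw [pvExpand_getD nn _ hl2 y x hy hx, bit_eq]
  rw [hB]
  have e2 : ((x : Int)).toNat = x := by omega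
  have e3 : ((x : Int) + 1).toNat = x + 1 := by omega
  by_cases h0 : x = 0
  · subst h0
    rw [if_neg (by omega : ¬ (0 ≤ ((0:Nat) : Int) - 1)), if_pos (by omega : 0 ≤ (((0:Nat)) : Int)),
      if_pos (by omega : 0 ≤ (((0:Nat)) : Int) + 1), if_pos rfl, e2, e3, bxor_zero_left]
    simp only [PySem.Int.bxor_natCast, toNat_xor, Bool.false_xor]
  · have e1 : ((x : Int) - 1).toNat = x - 1 := by omega
    rw [if_pos (by omega : (0:Int) ≤ (x : Int) - 1), if_pos (by omega : 0 ≤ ((x:Nat) : Int)),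
      if_pos (by omega : 0 ≤ ((x:Nat) : Int) + 1), if_neg h0, e1, e2, e3]
    simp only [PySem.Int.bxor_natCast, toNat_xor]

lemma pvSetAppend {α : Type} (as : List α) (b : α) (bs : List α) (v : α) :
    (as ++ b :: bs).set as.length v = as ++ v :: bs := by
  induction as with
  | nil => rfl
  | cons a as ih => simp [ih]

lemma pvExpand_zeros (nn : Nat) : pvExpand nn (List.replicate nn 0) = pvZl nn := by
  simp [pvExpand, pvZl, List.map_replicate]

lemma pvFoldB (nn m : Nat) :
    (List.range m).foldl (fun st _ => pvBStep (1 <<< nn - 1) st)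
      ([(List.range nn).map (fun y => 1 <<< y)], List.replicate nn 0)
    = ((List.range (m + 1)).map (fun k => (pvRows nn k).1), (pvRows nn m).2) := by
  induction m with
  | zero => simp [pvRows]
  | succ m ih =>
    rw [List.range_succ, List.foldl_append, ih]
    have hsplit : (List.range (m + 1)).map (fun k => (pvRows nn k).1)
        = (List.range m).map (fun k => (pvRows nn k).1) ++ [(pvRows nn m).1] := by
      rw [List.range_succ, List.map_append, List.map_singleton]
    simp only [List.foldl_cons, List.foldl_nil, pvBStep, hsplit,
      PySem.List.pyGetD_neg_one_append_singleton]
    rw [List.range_succ (n := m + 1), List.map_append, List.map_singleton]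
    rw [← hsplit]
    show ((List.range (m + 1)).map (fun k => (pvRows nn k).1)
      ++ [List.zipWith (fun r p => pvStep (1 <<< nn - 1) r p) (pvRows nn m).1 (pvRows nn m).2],
      (pvRows nn m).1) = _
    rfl

lemma pvFoldA (nn : Nat) : ∀ (m j : Nat), 1 ≤ j → j + m = nn + 1 →
    (PySem.List.pyRange (j : Int) ((nn : Int) + 1) 1).foldl (pvAStep (nn : Int) (pvZl nn))
      ((List.range j).map (pvG nn) ++ List.replicate m (pvZl nn))
    = (List.range (nn + 1)).map (pvG nn) := by
  intro m
  induction m with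
  | zero =>
    intro j hj hjm
    have hje : j = nn + 1 := by omega
    subst hje
    rw [PySem.List.pyRange_one_eq_nil (by push_cast; omega)]
    simp
  | succ m ih =>
    intro j hj hjm
    have hlt : (j : Int) < (nn : Int) + 1 := by omega
    rw [PySem.List.pyRange_one_cons hlt, List.foldl_cons]
    have hGmlen : ((List.range j).map (pvG nn)).length = j := by simp
    have hA : PySem.List.pyGetD
        ((List.range j).map (pvG nn) ++ List.replicate (m + 1) (pvZl nn)) ((j : Int) - 1) []
        = pvG nn (j - 1) := by
      rw [show (j : Int) - 1 = ((j - 1 : Nat) : Int) by omega, PySem.List.pyGetD_natCast]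
      rw [List.getD_eq_getElem?_getD, List.getElem?_append_left (by omega),
        List.getElem?_map, List.getElem?_range (by omega)]
      rfl
    have hB : (if (j : Int) - 2 ≥ 0 then PySem.List.pyGetD
          ((List.range j).map (pvG nn) ++ List.replicate (m + 1) (pvZl nn)) ((j : Int) - 2) []
        else pvZl nn) = pvExpand nn (pvRows nn (j - 1)).2 := by
      by_cases h2 : 2 ≤ j
      · rw [if_pos (by omega)]
        rw [show (j : Int) - 2 = ((j - 2 : Nat) : Int) by omega, PySem.List.pyGetD_natCast]
        rw [List.getD_eq_getElem?_getD, List.getElem?_append_left (by omega),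
          List.getElem?_map, List.getElem?_range (by omega)]
        rw [show j - 1 = (j - 2) + 1 by omega]
        rfl
      · rw [if_neg (by omega)]
        rw [show j - 1 = 0 by omega]
        exact (pvExpand_zeros nn).symm
    have hstep : pvAStep (nn : Int) (pvZl nn)
        ((List.range j).map (pvG nn) ++ List.replicate (m + 1) (pvZl nn)) (j : Int)
        = (List.range (j + 1)).map (pvG nn) ++ List.replicate m (pvZl nn) := by
      rw [pvAStep]
      rw [hA, hB]
      have hcore := pvCore nn (j - 1)
      rw [show pvG nn (j - 1) = pvExpand nn (pvRows nn (j - 1)).1 from rfl, hcore,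
        show (j - 1) + 1 = j by omega]
      rw [PySem.List.pySetD_natCast, List.replicate_succ]
      have hset := pvSetAppend ((List.range j).map (pvG nn)) (pvZl nn)
        (List.replicate m (pvZl nn)) (pvG nn j)
      rw [hGmlen] at hset
      rw [hset, List.range_succ, List.map_append, List.map_singleton]
      simp
    rw [hstep, show (j : Int) + 1 = ((j + 1 : Nat) : Int) by push_cast; ring]
    exact ih (j + 1) (by omega) (by omega)

-- ===== VERDICT (by name: the statement is the Claim_ definition above) =====
theorem make_mat_k_spec : Claim_equal_make_mat_k := by
  intro n _
  unfold Spec_make_mat_k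
  by_cases hn : n < 0
  · rw [make_mat_k, make_mat_k_alt, if_pos hn]
    rw [PySem.List.pyRange_one_eq_nil (by omega : n + 1 ≤ (0 : Int)),
      PySem.List.pyRange_one_eq_nil (by omega : n + 1 ≤ (1 : Int))]
    simp [PySem.List.pySetD, PySem.List.pySet?, PySem.List.pyIdx?]
  · obtain ⟨nn, rfl⟩ : ∃ nn : Nat, n = (nn : Int) := ⟨n.toNat, by omega⟩
    -- A side
    rw [make_mat_k]
    have hI : (PySem.List.pyRange 0 (nn : Int) 1).map (fun j =>
        (PySem.List.pyRange 0 (nn : Int) 1).map (fun i => if i = j then (1 : Int) else 0))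
        = pvG nn 0 := by
      rw [PySem.List.pyRange_zero_natCast]
      simp only [pvG, pvExpand, pvRows, List.map_map]
      apply List.map_congr_left
      intro j hj
      simp only [Function.comp_apply]
      apply List.map_congr_left
      intro i hi
      simp only [Function.comp_apply]
      rw [bit_eq, Nat.one_shiftLeft, Nat.testBit_two_pow]
      by_cases h : i = j
      · simp [h]
      · simp [h, Ne.symm h]
    have hZ : (PySem.List.pyRange 0 (nn : Int) 1).map
        (fun _ => List.replicate ((nn : Int)).toNat (0 : Int)) = pvZl nn := by
      rw [PySem.List.pyRange_zero_natCast, List.map_map]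
      simp [pvZl, Function.comp_def, List.map_const']
    rw [hI, hZ]
    have hM0 : (PySem.List.pyRange 0 ((nn : Int) + 1) 1).map (fun _ => pvZl nn)
        = List.replicate (nn + 1) (pvZl nn) := by
      rw [show (nn : Int) + 1 = ((nn + 1 : Nat) : Int) by push_cast; ring,
        PySem.List.pyRange_zero_natCast, List.map_map]
      simp [Function.comp_def, List.map_const']
    rw [hM0]
    have hM1 : PySem.List.pySetD (List.replicate (nn + 1) (pvZl nn)) 0 (pvG nn 0)
        = (List.range 1).map (pvG nn) ++ List.replicate nn (pvZl nn) := by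
      rw [show (0 : Int) = ((0 : Nat) : Int) from rfl, PySem.List.pySetD_natCast,
        List.replicate_succ]
      simp
    have hfa := pvFoldA nn nn 1 (by omega) (by omega)
    push_cast at hfa
    rw [hM1, hfa]
    -- B side
    rw [make_mat_k_alt, if_neg (by omega)]
    show _ = (((List.range nn).foldl (fun st _ => pvBStep (1 <<< nn - 1) st)
        ([(List.range nn).map (fun y => 1 <<< y)], List.replicate nn 0)).1).map
      (fun mat => mat.map (fun row =>
        (List.range nn).map (fun x => (((row >>> x) &&& 1 : Nat) : Int))))
    rw [pvFoldB nn nn]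
    simp only [List.map_map]
    apply List.map_congr_left
    intro k _
    rfl
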